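-- pv_equiv track=rewrite | github.com/AlbertVeli/misc-tools | caesar.py | init_caesar
-- ===== SOURCE A (Python) =====
-- import string
--
-- clear = string.ascii_lowercase + string.ascii_uppercase
--
-- ciph = bytearray(52)
--
-- def init_caesar(rot):
--     i = 0
--
--     a = ord('a')
--     offs = rot - a
--     for c in string.ascii_lowercase:
--         ciph[i] = (ord(c) + offs) % 26 + a
--         i += 1
--
--     a = ord('A')
--     offs = rot - a
--     for c in string.ascii_uppercase:
--         ciph[i] = (ord(c) + offs) % 26 + a
--         i += 1
--
--     return str.maketrans(clear, ciph.decode('ascii'))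
-- ===== SOURCE B (Python) =====
-- import string
--
--
-- def init_caesar(rot):
--     s = rot % 26
--     lo = string.ascii_lowercase
--     up = string.ascii_uppercase
--     return str.maketrans(lo + up, lo[s:] + lo[:s] + up[s:] + up[:s])
-- ===== Notes on version B (the rewrite author's own statement) =====
-- stated objective: idiomatic
-- what changed: Replaces the per-character modular-arithmetic loop writing into a global bytearray by a single alphabet rotation via slicing (lo[s:]+lo[:s], s = rot reduced modulo the alphabet length) fed straight to str.maketrans; B does not touch the module-global ciph.
import Mathlib
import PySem

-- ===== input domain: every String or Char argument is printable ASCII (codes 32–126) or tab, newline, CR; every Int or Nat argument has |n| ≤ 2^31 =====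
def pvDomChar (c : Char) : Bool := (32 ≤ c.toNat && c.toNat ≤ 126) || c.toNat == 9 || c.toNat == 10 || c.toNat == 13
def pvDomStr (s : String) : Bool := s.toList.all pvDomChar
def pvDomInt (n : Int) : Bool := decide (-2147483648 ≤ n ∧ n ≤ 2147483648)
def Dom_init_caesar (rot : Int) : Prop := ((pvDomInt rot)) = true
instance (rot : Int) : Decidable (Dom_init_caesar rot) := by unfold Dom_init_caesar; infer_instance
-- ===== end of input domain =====

set_option maxRecDepth 10000


-- B replaces A's per-character modular-arithmetic loop (which also writes into the module-global ciph
-- bytearray — the equivalence proved here is about the RETURN value only; B performs no such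
-- mutation) by rotating the alphabets with slices and handing them to maketrans.

-- character codes of string.ascii_lowercase / string.ascii_uppercase
def pvLower : List Int := (List.range 26).map (fun n => (97 + n : Int))
def pvUpper : List Int := (List.range 26).map (fun n => (65 + n : Int))

-- str.maketrans(x, y) for equal-length strings: the dict {ord(x[i]): ord(y[i])}
def pvMaketrans (x y : List Int) : List (Int × Int) :=
  ((x.zip y).foldl (fun d p => PySem.Dict.insert d p.1 p.2) PySem.Dict.empty).items

-- ===== PORT A =====
def init_caesar (rot : Int) : List (Int × Int) :=
  let cipL := pvLower.map (fun c => PySem.Int.mod (c + (rot - 97)) 26 + 97)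
  let cipU := pvUpper.map (fun c => PySem.Int.mod (c + (rot - 65)) 26 + 65)
  pvMaketrans (pvLower ++ pvUpper) (cipL ++ cipU)

-- ===== PORT B =====
def init_caesar_alt (rot : Int) : List (Int × Int) :=
  let s := PySem.Int.mod rot 26
  pvMaketrans (pvLower ++ pvUpper)
    ((PySem.List.slice pvLower (some s) none ++ PySem.List.slice pvLower none (some s)) ++
     (PySem.List.slice pvUpper (some s) none ++ PySem.List.slice pvUpper none (some s)))

-- ===== PRECONDITION & SPEC =====
def Spec_init_caesar (rot : Int) (out : List (Int × Int)) : Prop := out = init_caesar_alt rot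
instance (rot : Int) (out : List (Int × Int)) : Decidable (Spec_init_caesar rot out) := by unfold Spec_init_caesar; infer_instance

-- ===== CLAIM (what is proved, stated in full; the proofs are below) =====
def Claim_equal_init_caesar : Prop := ∀ (rot : Int), Dom_init_caesar rot → Spec_init_caesar rot (init_caesar rot)

-- ===== LEMMAS AND PROOFS =====

-- both programs depend on rot only through rot % 26; reduce to the 26 residues and compute
lemma init_caesar_eq_alt (rot : Int) : init_caesar rot = init_caesar_alt rot := by
  have hmod : PySem.Int.mod rot 26 = rot % 26 :=
    PySem.Int.mod_eq_emod_of_pos (by norm_num)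
  have h0 : 0 ≤ rot % 26 := Int.emod_nonneg _ (by norm_num)
  have h1 : rot % 26 < 26 := Int.emod_lt_of_pos _ (by norm_num)
  have hA : ∀ a : Int,
      (fun c => PySem.Int.mod (c + (rot - a)) 26 + a)
        = (fun c => PySem.Int.mod (c + (rot % 26 - a)) 26 + a) := by
    intro a; funext c
    rw [PySem.Int.mod_eq_emod_of_pos (b := 26) (by norm_num),
        PySem.Int.mod_eq_emod_of_pos (b := 26) (by norm_num)]
    omega
  unfold init_caesar init_caesar_alt
  rw [hA 97, hA 65, hmod]
  generalize (rot % 26) = r at h0 h1 ⊢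
  interval_cases r <;> decide

-- ===== VERDICT (by name: the statement is the Claim_ definition above) =====
theorem init_caesar_spec : Claim_equal_init_caesar := by
  intro rot _
  exact init_caesar_eq_alt rot
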